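-- pv_equiv track=rewrite | github.com/OneFriendlyCoder/labs | outvideo_css_labs/activity2/.evaluationScripts/autograder.py | remove_at_rules
-- ===== SOURCE A (Python) =====
-- def remove_at_rules(text):
--     i = 0
--     n = len(text)
--     out = []
--     while i < n:
--         if text[i] == '@':
--             brace_pos = text.find('{', i)
--             if brace_pos == -1:
--                 out.append(text[i:])
--                 break
--             depth = 1
--             k = brace_pos + 1
--             while k < n and depth > 0:
--                 if text[k] == '{':
--                     depth += 1
--                 elif text[k] == '}':
--                     depth -= 1
--                 k += 1
--             i = k
--         else:
--             out.append(text[i])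
--             i += 1
--     return ''.join(out)
-- ===== SOURCE B (Python) =====
-- def remove_at_rules(text):
--     out = []
--     pending = []
--     mode = 0  # 0 = NORMAL, 1 = SEEKING (after '@', before '{'), 2 = BRACES
--     depth = 0
--     for ch in text:
--         if mode == 0:
--             if ch == '@':
--                 pending = [ch]
--                 mode = 1
--             else:
--                 out.append(ch)
--         elif mode == 1:
--             if ch == '{':
--                 pending = []
--                 depth = 1
--                 mode = 2
--             else:
--                 pending.append(ch)
--         else:
--             if ch == '{':
--                 depth += 1
--             elif ch == '}':
--                 depth -= 1
--             if depth == 0: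
--                 mode = 0
--     if mode == 1:
--         out.extend(pending)
--     return ''.join(out)
-- ===== Notes on version B (the rewrite author's own statement) =====
-- stated objective: alternative
-- what changed: Replaced A's index arithmetic with text.find and a separate inner brace-skipping while loop by a single char-by-char pass over a three-mode state machine (NORMAL/SEEKING/BRACES) with a pending buffer flushed only if the input ends while still seeking the '{'.
import Mathlib
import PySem

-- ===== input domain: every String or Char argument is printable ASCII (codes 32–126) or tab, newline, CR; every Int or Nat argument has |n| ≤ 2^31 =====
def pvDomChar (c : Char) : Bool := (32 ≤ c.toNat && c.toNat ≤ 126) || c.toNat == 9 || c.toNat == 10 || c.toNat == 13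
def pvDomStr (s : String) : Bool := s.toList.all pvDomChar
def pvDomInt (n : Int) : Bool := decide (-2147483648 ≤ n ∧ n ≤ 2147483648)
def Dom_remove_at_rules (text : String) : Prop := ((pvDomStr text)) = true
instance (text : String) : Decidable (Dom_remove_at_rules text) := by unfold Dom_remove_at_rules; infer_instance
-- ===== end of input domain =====

-- B replaces A's find-then-inner-loop scan by a single-pass three-mode state machine; same cost, different decomposition.

-- ===== PORT A =====
-- text.find('{', i): since text[i] = '@' ≠ '{' there, searching from i equals searching the tail after '@'.
-- Returns the remainder after the first '{', or none (= Python's -1).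
def pvFindBrace : List Char → Option (List Char)
  | [] => none
  | c :: rest => if c = '{' then some rest else pvFindBrace rest

-- A's inner 'while k < n and depth > 0' loop: returns the remainder at position k where the loop exits.
def pvSkipBraces (depth : Nat) : List Char → List Char
  | [] => []
  | c :: rest =>
    let depth' := if c = '{' then depth + 1 else if c = '}' then depth - 1 else depth
    if depth' = 0 then rest else pvSkipBraces depth' rest

-- A's outer while loop over the remaining characters; each iteration consumes at least one
-- character, so length text + 1 steps of fuel always suffice.
def pvGoA : Nat → List Char → List Char
  | 0, _ => []
  | _ + 1, [] => []
  | fuel + 1, c :: rest =>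
    if c = '@' then
      match pvFindBrace rest with
      | none => c :: rest
      | some after => pvGoA fuel (pvSkipBraces 1 after)
    else c :: pvGoA fuel rest

def remove_at_rules (text : String) : String :=
  String.ofList (pvGoA (text.toList.length + 1) text.toList)

-- ===== PORT B =====
-- The three modes of Source B's state machine, one function per mode; pending/depth are the loop state.
mutual
def pvNormal : List Char → List Char
  | [] => []
  | c :: rest => if c = '@' then pvSeek [c] rest else c :: pvNormal rest
termination_by cs => cs.length

def pvSeek (pending : List Char) : List Char → List Char
  | [] => pending                      -- input ended while SEEKING: flush the pending buffer
  | c :: rest => if c = '{' then pvBraces 1 rest else pvSeek (pending ++ [c]) rest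
termination_by cs => cs.length

def pvBraces (depth : Nat) : List Char → List Char
  | [] => []
  | c :: rest =>
    let depth' := if c = '{' then depth + 1 else if c = '}' then depth - 1 else depth
    if depth' = 0 then pvNormal rest else pvBraces depth' rest
termination_by cs => cs.length
end

def remove_at_rules_alt (text : String) : String := String.ofList (pvNormal text.toList)

-- ===== PRECONDITION & SPEC =====
def Spec_remove_at_rules (text : String) (out : String) : Prop := out = remove_at_rules_alt text
instance (text : String) (out : String) : Decidable (Spec_remove_at_rules text out) := by unfold Spec_remove_at_rules; infer_instance

-- ===== CLAIM (what is proved, stated in full; the proofs are below) =====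
def Claim_equal_remove_at_rules : Prop := ∀ (text : String), Dom_remove_at_rules text → Spec_remove_at_rules text (remove_at_rules text)

-- ===== LEMMAS AND PROOFS =====

theorem pvSeek_eq (pending cs : List Char) :
    pvSeek pending cs = (match pvFindBrace cs with
      | none => pending ++ cs
      | some after => pvBraces 1 after) := by
  induction cs generalizing pending with
  | nil => simp [pvSeek, pvFindBrace]
  | cons c rest ih =>
    simp only [pvSeek, pvFindBrace]
    split
    · rfl
    · rw [ih]
      cases pvFindBrace rest <;> simp

theorem pvSkipBraces_len (depth : Nat) (cs : List Char) : (pvSkipBraces depth cs).length ≤ cs.length := by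
  induction cs generalizing depth with
  | nil => simp [pvSkipBraces]
  | cons c rest ih =>
    simp only [pvSkipBraces]
    generalize (if c = '{' then depth + 1 else if c = '}' then depth - 1 else depth) = d
    split
    · simp
    · exact Nat.le_trans (ih d) (by simp)

theorem pvFindBrace_len {cs after : List Char} (h : pvFindBrace cs = some after) : after.length < cs.length := by
  induction cs with
  | nil => simp [pvFindBrace] at h
  | cons c rest ih =>
    simp only [pvFindBrace] at h
    split at h
    · cases h; simp
    · exact Nat.lt_trans (ih h) (by simp)

theorem pvBraces_eq (depth : Nat) (cs : List Char) :
    pvBraces depth cs = pvNormal (pvSkipBraces depth cs) := by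
  induction cs generalizing depth with
  | nil => simp [pvBraces, pvSkipBraces, pvNormal]
  | cons c rest ih =>
    simp only [pvBraces, pvSkipBraces]
    generalize (if c = '{' then depth + 1 else if c = '}' then depth - 1 else depth) = d
    split
    · rfl
    · exact ih d

theorem pvGoA_eq_pvNormal (fuel : Nat) (cs : List Char) (hn : cs.length < fuel) :
    pvGoA fuel cs = pvNormal cs := by
  induction fuel generalizing cs with
  | zero => omega
  | succ n ih =>
    cases cs with
    | nil => simp [pvGoA, pvNormal]
    | cons c rest =>
      simp only [pvGoA, pvNormal]
      by_cases hc : c = '@'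
      · simp only [hc, if_true]
        rw [pvSeek_eq]
        cases h : pvFindBrace rest with
        | none => simp
        | some after =>
          simp only []
          rw [pvBraces_eq]
          have h1 := pvFindBrace_len h
          have h2 := pvSkipBraces_len 1 after
          exact ih _ (by simp at hn; omega)
      · simp only [if_neg hc]
        rw [ih rest (by simp at hn; omega)]

-- ===== VERDICT (by name: the statement is the Claim_ definition above) =====
theorem remove_at_rules_spec : Claim_equal_remove_at_rules := by
  intro text _
  unfold Spec_remove_at_rules remove_at_rules remove_at_rules_alt
  rw [pvGoA_eq_pvNormal (text.toList.length + 1) text.toList (Nat.lt_succ_self _)]
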